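-- pv_equiv track=rewrite | github.com/liquid-releasing/funscript-updater | ui/streamlit/panels/export_panel.py | _clamp_sort_dedup
-- ===== SOURCE A (Python) =====
-- from typing import TYPE_CHECKING, Dict, List, Optional
--
-- def _clamp_sort_dedup(actions: list) -> int:
--     """Sort by timestamp, deduplicate (last pos wins for same `at`), clamp pos to [0, 100].
--
--     Mutates *actions* in-place.  Returns the number of actions that were clamped.
--     """
--     # Sort by timestamp
--     actions.sort(key=lambda a: a["at"])
--     # Deduplicate: keep last pos written for each timestamp
--     seen: Dict[int, int] = {}
--     for a in actions:
--         seen[a["at"]] = a["pos"]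
--     actions[:] = [{"at": t, "pos": p} for t, p in seen.items()]
--     # Clamp
--     clamp_count = 0
--     for a in actions:
--         clamped = max(0, min(100, a["pos"]))
--         if clamped != a["pos"]:
--             clamp_count += 1
--             a["pos"] = clamped
--     return clamp_count
-- ===== SOURCE B (Python) =====
-- # B: one reverse scan -- the first hit per timestamp in reverse order is the last
-- # occurrence in original order (== last in A's stable sort), so dedup with a seen-set
-- # while clamping and counting, then sort only the deduped survivors.
-- def _clamp_sort_dedup(actions: list) -> int:
--     seen = set()
--     clamp_count = 0
--     kept = []
--     for a in reversed(actions):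
--         t = a["at"]
--         if t not in seen:
--             seen.add(t)
--             p = a["pos"]
--             c = 0 if p < 0 else (100 if p > 100 else p)
--             if c != p:
--                 clamp_count += 1
--             kept.append({"at": t, "pos": c})
--     kept.sort(key=lambda a: a["at"])
--     actions[:] = kept
--     return clamp_count
-- ===== Notes on version B (the rewrite author's own statement) =====
-- stated objective: alternative
-- what changed: B replaces A's sort-everything/dict-overwrite/clamp passes by a single reverse scan with a seen-set: the first hit per timestamp in reverse order is the last occurrence, so it dedups, clamps and counts in that one backward pass and only sorts the few deduped survivors at the end.
import Mathlib
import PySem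

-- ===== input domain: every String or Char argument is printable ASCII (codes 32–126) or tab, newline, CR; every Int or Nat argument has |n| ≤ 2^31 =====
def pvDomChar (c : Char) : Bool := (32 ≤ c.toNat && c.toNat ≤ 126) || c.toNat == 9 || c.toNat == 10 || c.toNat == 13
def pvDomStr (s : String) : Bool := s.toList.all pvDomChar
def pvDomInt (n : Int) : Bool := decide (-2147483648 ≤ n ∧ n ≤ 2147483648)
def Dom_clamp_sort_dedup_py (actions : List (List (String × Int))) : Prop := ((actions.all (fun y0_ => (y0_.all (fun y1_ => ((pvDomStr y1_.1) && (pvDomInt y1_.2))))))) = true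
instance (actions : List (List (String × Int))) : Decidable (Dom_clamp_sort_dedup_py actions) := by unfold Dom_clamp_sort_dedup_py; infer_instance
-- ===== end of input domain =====

-- B scans the input once in REVERSE with a seen-set (first hit per timestamp in reverse
-- = last occurrence in original order = last in A's stable sort), clamping and counting
-- in that pass; equality is proved for the RETURN value (the clamp count) — both Pythons
-- also rebuild `actions` in place to the same sorted/deduped/clamped list.

-- a["at"] / a["pos"]: first-match dict lookup; Pre_ guarantees the key is present,
-- so the `.getD 0` default is never the value used.
def pvAt (a : List (String × Int)) : Int := ((PySem.Dict.mk a).get? "at").getD 0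
def pvPos (a : List (String × Int)) : Int := ((PySem.Dict.mk a).get? "pos").getD 0

-- ===== PORT A =====
-- Literal port of A: stable sort by "at", dict pass over the sorted list (last pos wins),
-- rebuild the action dicts, then the clamp-counting loop.  (A's in-place writes of the
-- clamped pos are not observable in the returned count and are not modelled.)
def clamp_sort_dedup_py (actions : List (List (String × Int))) : Int :=
  let sortedActs := PySem.List.sorted actions (fun a => pvAt a)
  let seen := sortedActs.foldl (fun d a => d.insert (pvAt a) (pvPos a))
      (PySem.Dict.empty : PySem.Dict Int Int)
  let newActs := seen.items.map (fun tp => [("at", tp.1), ("pos", tp.2)])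
  newActs.foldl (fun clamp_count a =>
    let clamped := max 0 (min 100 (pvPos a))
    if clamped != pvPos a then clamp_count + 1 else clamp_count) 0

-- ===== PORT B =====
-- Source B's loop body (t / p / c locals, the `t not in seen` guard, the three running
-- pieces of state: the seen-set, the clamp count and the `kept` list).
def pvStepB (st : PySem.Set Int × Int × List (List (String × Int)))
    (a : List (String × Int)) : PySem.Set Int × Int × List (List (String × Int)) :=
  let t := pvAt a
  if PySem.Set.contains st.1 t then st
  else
    let p := pvPos a
    let c : Int := if p < 0 then 0 else if p > 100 then 100 else p
    (PySem.Set.add st.1 t,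
     (if c != p then st.2.1 + 1 else st.2.1),
     st.2.2 ++ [[("at", t), ("pos", c)]])

-- Literal port of B: one fold of pvStepB over `reversed(actions)`.  (Source B's final
-- `kept.sort` / `actions[:] = kept` only affect the in-place mutation, not the return.)
def clamp_sort_dedup_py_alt (actions : List (List (String × Int))) : Int :=
  (actions.reverse.foldl pvStepB
    ((PySem.Set.empty : PySem.Set Int), (0 : Int), ([] : List (List (String × Int))))).2.1

-- ===== PRECONDITION & SPEC =====
-- Pre_ excludes exactly the inputs where Python raises KeyError: an action without an
-- "at" or "pos" key (both A and B raise there).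
def Pre_clamp_sort_dedup_py (actions : List (List (String × Int))) : Prop :=
  ∀ a ∈ actions, ((PySem.Dict.mk a).get? "at").isSome ∧ ((PySem.Dict.mk a).get? "pos").isSome
instance (actions : List (List (String × Int))) : Decidable (Pre_clamp_sort_dedup_py actions) := by unfold Pre_clamp_sort_dedup_py; infer_instance
def pvWitness_clamp_sort_dedup_py : (List (List (String × Int))) :=
  [[("at", 1), ("pos", 150)], [("at", 1), ("pos", 50)], [("at", 0), ("pos", -3)]]

def Spec_clamp_sort_dedup_py (actions : List (List (String × Int))) (out : Int) : Prop := out = clamp_sort_dedup_py_alt actions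
instance (actions : List (List (String × Int))) (out : Int) : Decidable (Spec_clamp_sort_dedup_py actions out) := by unfold Spec_clamp_sort_dedup_py; infer_instance

-- ===== CLAIM (what is proved, stated in full; the proofs are below) =====
def Claim_equal_clamp_sort_dedup_py : Prop := ∀ (actions : List (List (String × Int))), Dom_clamp_sort_dedup_py actions → Pre_clamp_sort_dedup_py actions → Spec_clamp_sort_dedup_py actions (clamp_sort_dedup_py actions)

-- ===== LEMMAS AND PROOFS =====

-- the filter "actions with timestamp k"
def pvQ (k : Int) (a : List (String × Int)) : Bool := pvAt a == k

-- B's out-of-range test on an action (its clamp `c` differs from `p`)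
def pvBadB (a : List (String × Int)) : Bool :=
  (if pvPos a < 0 then (0 : Int) else if pvPos a > 100 then 100 else pvPos a) != pvPos a

-- the clamp count produced by B's loop, as a stand-alone recursion
def pvCountB : List (List (String × Int)) → PySem.Set Int → Int
  | [], _ => 0
  | a :: l, s =>
      if PySem.Set.contains s (pvAt a) then pvCountB l s
      else (if pvBadB a then 1 else 0) + pvCountB l (PySem.Set.add s (pvAt a))

-- the timestamps B's loop accepts (first occurrences not already in s), in scan order
def pvNewKeys : List (List (String × Int)) → PySem.Set Int → List Int
  | [], _ => []
  | a :: l, s =>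
      if PySem.Set.contains s (pvAt a) then pvNewKeys l s
      else pvAt a :: pvNewKeys l (PySem.Set.add s (pvAt a))

-- B's predicate on a timestamp: the FIRST action with that timestamp is out of range
def pvQFirst (l : List (List (String × Int))) (k : Int) : Bool :=
  ((l.filter (pvQ k)).head?).elim false pvBadB

-- stability of insertion into a key-ordered list: the key-k subsequence just gains x at the end
theorem pv_filter_insertBy (k : Int) (x : List (String × Int)) (ys : List (List (String × Int)))
    (hys : ys.Pairwise (fun a b => pvAt a ≤ pvAt b)) :
    (PySem.List.insertBy (fun a b => decide (pvAt a < pvAt b)) x ys).filter (pvQ k)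
      = ys.filter (pvQ k) ++ (if pvQ k x then [x] else []) := by
  induction ys with
  | nil => simp [PySem.List.insertBy, List.filter_cons]
  | cons y ys ih =>
    rw [List.pairwise_cons] at hys
    by_cases h : pvAt x < pvAt y
    · simp only [PySem.List.insertBy, h, decide_true]
      by_cases hq : pvQ k x
      · have hk : pvAt x = k := by simpa [pvQ] using hq
        have hy : pvQ k y = false := by simp [pvQ]; omega
        have hys' : ∀ z ∈ ys, pvQ k z = false := by
          intro z hz
          have := hys.1 z hz
          simp [pvQ]; omega
        have hnil : List.filter (pvQ k) ys = [] :=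
          List.filter_eq_nil_iff.mpr (by intro z hz; simp [hys' z hz])
        simp [hq, hy, hnil]
      · simp [List.filter_cons, hq]
    · simp only [PySem.List.insertBy, h, decide_false, Bool.false_eq_true, if_false]
      rw [List.filter_cons, List.filter_cons]
      by_cases hy : pvQ k y <;> simp [hy, ih hys.2, List.cons_append]

-- stability of the Python sort: the subsequence with timestamp k is unchanged
theorem pv_filter_sorted (k : Int) (l : List (List (String × Int))) :
    (PySem.List.sorted l (fun a => pvAt a)).filter (pvQ k) = l.filter (pvQ k) := by
  induction l using List.reverseRecOn with
  | nil => rw [PySem.List.sorted_eq_foldl_insertBy]; rfl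
  | append_singleton xs x ih =>
    rw [PySem.List.sorted_eq_foldl_insertBy, List.foldl_append, List.foldl_cons, List.foldl_nil,
        ← PySem.List.sorted_eq_foldl_insertBy,
        pv_filter_insertBy k x _ (PySem.List.sorted_pairwise xs _), ih, List.filter_append]
    simp [List.filter_cons]

-- the dict built by A's insert loop looks up the LAST action with timestamp k
theorem pv_get?_foldl_insert (k : Int) (l : List (List (String × Int))) (d : PySem.Dict Int Int) :
    (l.foldl (fun d a => d.insert (pvAt a) (pvPos a)) d).get? k
      = ((l.filter (pvQ k)).getLast?).elim (d.get? k) (fun a => some (pvPos a)) := by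
  induction l using List.reverseRecOn with
  | nil => simp
  | append_singleton l a ih =>
    rw [List.foldl_append, List.foldl_cons, List.foldl_nil, List.filter_append]
    by_cases hq : pvQ k a
    · have hk : pvAt a = k := by simpa [pvQ] using hq
      rw [hk, PySem.Dict.get?_insert_self]
      simp [hq]
    · have hk : k ≠ pvAt a := by simp [pvQ] at hq; omega
      rw [PySem.Dict.get?_insert_of_ne _ _ hk, ih]
      simp [hq]

-- B's fold projects to pvCountB (the kept list and the set do not feed back into the count)
theorem pv_fold_proj (l : List (List (String × Int))) (s : PySem.Set Int) (c : Int)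
    (r : List (List (String × Int))) :
    (l.foldl pvStepB (s, c, r)).2.1 = c + pvCountB l s := by
  induction l generalizing s c r with
  | nil => simp [pvCountB]
  | cons a l ih =>
    simp only [List.foldl_cons, pvStepB, pvCountB]
    by_cases h : PySem.Set.contains s (pvAt a)
    · simp only [h, if_true]; rw [ih]
    · simp only [h, Bool.false_eq_true, if_false]
      rw [ih]
      by_cases hb : pvBadB a
      · have : ((if pvPos a < 0 then (0:Int) else if pvPos a > 100 then 100 else pvPos a)
            != pvPos a) = true := hb
        rw [this]; simp [hb]; ring
      · have : ((if pvPos a < 0 then (0:Int) else if pvPos a > 100 then 100 else pvPos a)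
            != pvPos a) = false := by simpa [pvBadB] using hb
        rw [this]; simp [hb]

-- keys accepted by B's loop were not already seen
theorem pv_newKeys_not_mem (l : List (List (String × Int))) (s : PySem.Set Int) (k : Int)
    (hk : k ∈ pvNewKeys l s) : k ∉ s := by
  induction l generalizing s with
  | nil => simp [pvNewKeys] at hk
  | cons a l ih =>
    simp only [pvNewKeys] at hk
    by_cases h : pvAt a ∈ s
    · rw [if_pos (show PySem.Set.contains s (pvAt a) = true by simpa using h)] at hk
      exact ih s hk
    · rw [if_neg (show ¬ PySem.Set.contains s (pvAt a) = true by simpa using h)] at hk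
      rcases List.mem_cons.mp hk with rfl | hk'
      · exact h
      · exact fun hmem => ih _ hk' (by rw [PySem.Set.mem_add]; exact Or.inl hmem)

theorem pv_nodup_newKeys (l : List (List (String × Int))) (s : PySem.Set Int) :
    (pvNewKeys l s).Nodup := by
  induction l generalizing s with
  | nil => simp [pvNewKeys]
  | cons a l ih =>
    simp only [pvNewKeys]
    by_cases h : pvAt a ∈ s
    · rw [if_pos (show PySem.Set.contains s (pvAt a) = true by simpa using h)]
      exact ih s
    · rw [if_neg (show ¬ PySem.Set.contains s (pvAt a) = true by simpa using h)]
      refine List.nodup_cons.mpr ⟨fun hmem => ?_, ih _⟩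
      exact pv_newKeys_not_mem _ _ _ hmem (by rw [PySem.Set.mem_add]; exact Or.inr rfl)

theorem pv_mem_newKeys (l : List (List (String × Int))) (s : PySem.Set Int) (k : Int) :
    k ∈ pvNewKeys l s ↔ k ∈ l.map pvAt ∧ k ∉ s := by
  induction l generalizing s with
  | nil => simp [pvNewKeys]
  | cons a l ih =>
    simp only [pvNewKeys, List.map_cons, List.mem_cons]
    by_cases h : PySem.Set.contains s (pvAt a)
    · have ha : pvAt a ∈ s := by simpa using h
      rw [if_pos h, ih]
      constructor
      · rintro ⟨hm, hns⟩; exact ⟨Or.inr hm, hns⟩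
      · rintro ⟨hm | hm, hns⟩
        · exact absurd (hm ▸ ha) hns
        · exact ⟨hm, hns⟩
    · have ha : pvAt a ∉ s := by simpa using h
      rw [if_neg h]
      simp only [List.mem_cons, ih, PySem.Set.mem_add]
      constructor
      · rintro (rfl | ⟨hm, hns⟩)
        · exact ⟨Or.inl rfl, ha⟩
        · exact ⟨Or.inr hm, fun hs => hns (Or.inl hs)⟩
      · rintro ⟨rfl | hm, hns⟩
        · exact Or.inl rfl
        · by_cases hka : k = pvAt a
          · exact Or.inl hka
          · exact Or.inr ⟨hm, fun hs => hs.elim hns hka⟩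

-- pvCountB counts, over the accepted timestamps, those whose first occurrence is bad
theorem pv_countB_eq (l : List (List (String × Int))) (s : PySem.Set Int) :
    pvCountB l s = ((pvNewKeys l s).countP (pvQFirst l) : Int) := by
  induction l generalizing s with
  | nil => simp [pvCountB, pvNewKeys]
  | cons a l ih =>
    have hcongr : ∀ (s' : PySem.Set Int), pvAt a ∈ s' →
        List.countP (pvQFirst (a :: l)) (pvNewKeys l s') = List.countP (pvQFirst l) (pvNewKeys l s') := by
      intro s' ha
      refine List.countP_congr (fun k hk => ?_)
      have hks : k ∉ s' := pv_newKeys_not_mem _ _ _ hk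
      have hne : pvQ k a = false := by
        simp only [pvQ, beq_eq_false_iff_ne, ne_eq]
        intro hak; exact hks (hak ▸ ha)
      simp [pvQFirst, hne]
    simp only [pvCountB, pvNewKeys]
    by_cases h : PySem.Set.contains s (pvAt a)
    · rw [if_pos h, if_pos h, ih, hcongr s (by simpa using h)]
    · rw [if_neg h, if_neg h, List.countP_cons, ih,
          hcongr (PySem.Set.add s (pvAt a)) (by rw [PySem.Set.mem_add]; right; rfl)]
      have hfirst : pvQFirst (a :: l) (pvAt a) = pvBadB a := by
        simp [pvQFirst, pvQ]
      rw [hfirst]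
      by_cases hb : pvBadB a
      · simp [hb]; ring
      · simp [hb]

-- the two out-of-range tests (A's max/min clamp vs B's conditional clamp) agree
theorem pv_bad_eq (p : Int) :
    (max 0 (min 100 p) != p) = ((if p < 0 then (0 : Int) else if p > 100 then 100 else p) != p) := by
  rcases lt_or_ge p 0 with h | h
  · rw [if_pos h]
    have : max 0 (min 100 p) = 0 := by omega
    rw [this]
  · rw [if_neg (by omega)]
    rcases lt_or_ge (100 : Int) p with h2 | h2
    · rw [if_pos h2]
      have : max 0 (min 100 p) = 100 := by omega
      rw [this]
    · rw [if_neg (by omega)]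
      have : max 0 (min 100 p) = p := by omega
      rw [this]

-- ===== VERDICT (by name: the statement is the Claim_ definition above) =====
theorem clamp_sort_dedup_py_spec : Claim_equal_clamp_sort_dedup_py := by
  intro actions _ _
  unfold Spec_clamp_sort_dedup_py clamp_sort_dedup_py clamp_sort_dedup_py_alt
  simp only []
  set sA := PySem.List.sorted actions (fun a => pvAt a) with hsA
  set seenA := sA.foldl (fun d a => d.insert (pvAt a) (pvPos a))
      (PySem.Dict.empty : PySem.Dict Int Int) with hseenA
  -- B's side: project the fold, then characterise it as a countP over its accepted keys
  rw [pv_fold_proj, pv_countB_eq, zero_add]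
  -- A's side: the counting fold is a countP over the rebuilt actions, i.e. over the items
  rw [PySem.List.foldl_count_if]
  have hndA : seenA.keys.Nodup := by
    rw [hseenA]; exact PySem.Dict.nodup_keys_foldl_insert_key _ _ _ _ (by simp)
  -- reduce A's countP to a countP over seenA.keys
  have hA : List.countP (fun a => max 0 (min 100 (pvPos a)) != pvPos a)
        (List.map (fun tp : Int × Int => [("at", tp.1), ("pos", tp.2)]) seenA.items)
      = List.countP (fun k => max 0 (min 100 (seenA.getD k 0)) != seenA.getD k 0) seenA.keys := by
    rw [List.countP_map, PySem.Dict.items_eq_map_keys seenA hndA 0, List.countP_map]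
    rfl
  rw [hA]
  -- the last action with timestamp k, shared by both characterisations
  have hgetA : ∀ k : Int, seenA.get? k
      = ((actions.filter (pvQ k)).getLast?).elim none (fun a => some (pvPos a)) := by
    intro k
    rw [hseenA, pv_get?_foldl_insert, hsA, pv_filter_sorted]
    simp
  have hmemA : ∀ k : Int, k ∈ seenA.keys ↔ k ∈ actions.map pvAt := by
    intro k
    have hkeys : seenA.keys = PySem.Set.ofList (sA.map pvAt) := by
      rw [hseenA, PySem.Dict.keys_foldl_insert_key]
      simp [PySem.Set.ofList_eq_foldl, PySem.Set.update]
    rw [hkeys, PySem.Set.mem_ofList, hsA]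
    exact ((PySem.List.sorted_perm actions (fun a => pvAt a) false).map pvAt).mem_iff
  have hmemB : ∀ k : Int, k ∈ pvNewKeys actions.reverse PySem.Set.empty ↔ k ∈ actions.map pvAt := by
    intro k
    rw [pv_mem_newKeys]
    simp [PySem.Set.empty, List.map_reverse]
  -- on every present timestamp the two predicates agree
  have hq : ∀ k ∈ actions.map pvAt,
      (max 0 (min 100 (seenA.getD k 0)) != seenA.getD k 0)
        = pvQFirst actions.reverse k := by
    intro k hk
    obtain ⟨a, ha, hak⟩ := List.mem_map.mp hk
    have hfil : a ∈ actions.filter (pvQ k) :=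
      List.mem_filter.mpr ⟨ha, by simp [pvQ, hak]⟩
    cases hL : (actions.filter (pvQ k)).getLast? with
    | none => exact absurd (List.getLast?_eq_none_iff.mp hL ▸ hfil) (List.not_mem_nil)
    | some a0 =>
      have hgd : seenA.getD k 0 = pvPos a0 := by
        rw [PySem.Dict.getD_eq_get?_getD, hgetA k, hL]; rfl
      have hB : pvQFirst actions.reverse k = pvBadB a0 := by
        rw [pvQFirst, List.filter_reverse, List.head?_reverse, hL]; rfl
      rw [hgd, hB, pv_bad_eq]; rfl
  -- both counts are lengths of filters of nodup lists with the same members → permutation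
  have hndB := pv_nodup_newKeys actions.reverse PySem.Set.empty
  have hperm : (seenA.keys.filter (fun k => max 0 (min 100 (seenA.getD k 0)) != seenA.getD k 0)).Perm
      ((pvNewKeys actions.reverse PySem.Set.empty).filter (pvQFirst actions.reverse)) := by
    rw [List.perm_ext_iff_of_nodup (hndA.filter _) (hndB.filter _)]
    intro k
    simp only [List.mem_filter]
    constructor
    · rintro ⟨hm, hp⟩
      have hm' := (hmemA k).mp hm
      exact ⟨(hmemB k).mpr hm', by rw [← hq k hm']; exact hp⟩
    · rintro ⟨hm, hp⟩
      have hm' := (hmemB k).mp hm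
      exact ⟨(hmemA k).mpr hm', by rw [hq k hm']; exact hp⟩
  rw [List.countP_eq_length_filter, List.countP_eq_length_filter, hperm.length_eq]
  omega
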